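-- pv_equiv track=rewrite | github.com/ousma15abdoulaye-crypto/decision-memory-v1 | src/procurement/eligibility_gate.py | _hits_cover_expected
-- ===== SOURCE A (Python) =====
-- def _hits_cover_expected(
--     expected: list[str], hits: list[str]
-- ) -> tuple[list[str], list[str]]:
--     hit_set = set(hits)
--     matched: list[str] = []
--     missing: list[str] = []
--     for token in expected:
--         if token in hit_set or any(token in h for h in hits):
--             matched.append(token)
--         else:
--             missing.append(token)
--     return matched, missing
-- ===== SOURCE B (Python) =====
-- def _hits_cover_expected(
--     expected: list[str], hits: list[str]
-- ) -> tuple[list[str], list[str]]: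
--     covered = set(expected) & set(hits)
--     pending = [t for t in expected if t not in covered]
--     for h in hits:
--         if not pending:
--             break
--         remaining = []
--         for t in pending:
--             if t in h:
--                 covered.add(t)
--             else:
--                 remaining.append(t)
--         pending = remaining
--     matched = [t for t in expected if t in covered]
--     missing = [t for t in expected if t not in covered]
--     return matched, missing
-- ===== Notes on version B (the rewrite author's own statement) =====
-- stated objective: alternative
-- what changed: Inverted the loop nest: B first covers exact-equality matches by set intersection, then scans hits in the outer loop over a shrinking pending list (tokens leave the scan once covered, the loop breaks when nothing is pending), and finally partitions expected by membership in the covered set; A rescans all hits for every expected token.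
import Mathlib
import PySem

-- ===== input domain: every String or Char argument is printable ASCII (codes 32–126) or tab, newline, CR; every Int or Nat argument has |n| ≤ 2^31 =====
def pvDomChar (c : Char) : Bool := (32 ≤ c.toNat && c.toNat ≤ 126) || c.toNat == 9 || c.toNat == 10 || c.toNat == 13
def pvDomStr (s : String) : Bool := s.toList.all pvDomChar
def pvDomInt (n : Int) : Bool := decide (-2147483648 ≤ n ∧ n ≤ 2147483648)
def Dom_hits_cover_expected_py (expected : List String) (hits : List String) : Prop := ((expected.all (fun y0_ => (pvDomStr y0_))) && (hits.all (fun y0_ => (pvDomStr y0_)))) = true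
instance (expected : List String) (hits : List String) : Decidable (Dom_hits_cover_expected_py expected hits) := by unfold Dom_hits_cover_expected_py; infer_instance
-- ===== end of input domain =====

-- B inverts A's loop nest (hits outer, building a covered-token set once) and then
-- partitions expected by set membership; alternative decomposition, not claimed faster.

-- ===== PORT A =====
-- literal port of A: one pass over expected, for each token check the hit set and rescan hits
def hits_cover_expected_py (expected : List String) (hits : List String) : List String × List String :=
  let hit_set := PySem.Set.ofList hits
  expected.foldl
    (fun (acc : List String × List String) token =>
      if PySem.Set.contains hit_set token || hits.any (fun h => PySem.Str.isIn token h) then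
        (acc.1 ++ [token], acc.2)
      else
        (acc.1, acc.2 ++ [token]))
    ([], [])

-- ===== PORT B =====
-- literal port of B: python's for-loop over hits with the break and the shrinking pending list
def pvLoopB (hits : List String) (cov : PySem.Set String) (pending : List String) :
    PySem.Set String × List String :=
  match hits with
  | [] => (cov, pending)
  | h :: tl =>
      if pending.isEmpty then (cov, pending)    -- 'if not pending: break'
      else
        let step := pending.foldl
          (fun (acc : PySem.Set String × List String) t =>
            if PySem.Str.isIn t h then (PySem.Set.add acc.1 t, acc.2)
            else (acc.1, acc.2 ++ [t]))
          (cov, [])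
        pvLoopB tl step.1 step.2

def hits_cover_expected_py_alt (expected : List String) (hits : List String) : List String × List String :=
  let covered0 := PySem.Set.inter (PySem.Set.ofList expected) (PySem.Set.ofList hits)
  let pending0 := expected.filter (fun t => !(PySem.Set.contains covered0 t))
  let covered := (pvLoopB hits covered0 pending0).1
  (expected.filter (fun t => PySem.Set.contains covered t),
   expected.filter (fun t => !(PySem.Set.contains covered t)))

-- ===== PRECONDITION & SPEC =====
def Spec_hits_cover_expected_py (expected : List String) (hits : List String) (out : List String × List String) : Prop := out = hits_cover_expected_py_alt expected hits
instance (expected : List String) (hits : List String) (out : List String × List String) : Decidable (Spec_hits_cover_expected_py expected hits out) := by unfold Spec_hits_cover_expected_py; infer_instance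

-- ===== CLAIM (what is proved, stated in full; the proofs are below) =====
def Claim_equal_hits_cover_expected_py : Prop := ∀ (expected : List String) (hits : List String), Dom_hits_cover_expected_py expected hits → Spec_hits_cover_expected_py expected hits (hits_cover_expected_py expected hits)

-- ===== LEMMAS AND PROOFS =====

-- the common predicate: token is a substring of some hit
def pvCov (hits : List String) (t : String) : Bool := hits.any (fun h => PySem.Str.isIn t h)

-- B's inner pass over pending: membership in the grown set
theorem pvStep_fst_mem (pend : List String) (h : String) (cov : PySem.Set String)
    (r : List String) (x : String) :
    (x ∈ (pend.foldl
        (fun (acc : PySem.Set String × List String) t =>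
          if PySem.Str.isIn t h then (PySem.Set.add acc.1 t, acc.2)
          else (acc.1, acc.2 ++ [t]))
        (cov, r)).1)
    ↔ x ∈ cov ∨ (x ∈ pend ∧ PySem.Str.isIn x h = true) := by
  induction pend generalizing cov r with
  | nil => simp
  | cons a tl ih =>
      simp only [List.foldl_cons]
      by_cases hc : PySem.Str.isIn a h = true
      · rw [if_pos hc, ih]
        simp only [PySem.Set.mem_add, List.mem_cons]
        constructor
        · rintro ((hx | rfl) | ⟨hx, hi⟩)
          · exact Or.inl hx
          · exact Or.inr ⟨Or.inl rfl, hc⟩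
          · exact Or.inr ⟨Or.inr hx, hi⟩
        · rintro (hx | ⟨(rfl | hx), hi⟩)
          · exact Or.inl (Or.inl hx)
          · exact Or.inl (Or.inr rfl)
          · exact Or.inr ⟨hx, hi⟩
      · rw [if_neg hc, ih]
        simp only [List.mem_cons]
        constructor
        · rintro (hx | ⟨hx, hi⟩)
          · exact Or.inl hx
          · exact Or.inr ⟨Or.inr hx, hi⟩
        · rintro (hx | ⟨(rfl | hx), hi⟩)
          · exact Or.inl hx
          · exact absurd hi hc
          · exact Or.inr ⟨hx, hi⟩

-- B's inner pass: the remaining list is the filter of pending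
theorem pvStep_snd (pend : List String) (h : String) (cov : PySem.Set String) (r : List String) :
    (pend.foldl
        (fun (acc : PySem.Set String × List String) t =>
          if PySem.Str.isIn t h then (PySem.Set.add acc.1 t, acc.2)
          else (acc.1, acc.2 ++ [t]))
        (cov, r)).2
    = r ++ pend.filter (fun t => !(PySem.Str.isIn t h)) := by
  induction pend generalizing cov r with
  | nil => simp
  | cons a tl ih =>
      simp only [List.foldl_cons, List.filter_cons]
      by_cases hc : PySem.Str.isIn a h = true
      · rw [if_pos hc, ih, hc]
        simp
      · rw [if_neg hc, ih, Bool.eq_false_iff.2 hc]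
        simp

-- B's outer loop: the final set holds the pending tokens that occur in some hit
theorem pvLoopB_fst_mem (hits : List String) (cov : PySem.Set String) (pend : List String)
    (x : String) :
    (x ∈ (pvLoopB hits cov pend).1) ↔ x ∈ cov ∨ (x ∈ pend ∧ pvCov hits x = true) := by
  induction hits generalizing cov pend with
  | nil => simp [pvLoopB, pvCov]
  | cons h tl ih =>
      rw [pvLoopB]
      by_cases he : pend.isEmpty
      · rw [if_pos he]
        rw [List.isEmpty_iff] at he
        subst he
        simp
      · rw [if_neg he]
        simp only [ih, pvStep_fst_mem, pvStep_snd, List.nil_append, List.mem_filter,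
          Bool.not_eq_true', pvCov, List.any_cons, Bool.or_eq_true]
        by_cases hi : PySem.Str.isIn x h = true
        · have h2 : ¬ (PySem.Str.isIn x h = false) := by rw [hi]; simp
          tauto
        · have h2 : PySem.Str.isIn x h = false := Bool.eq_false_iff.2 hi
          tauto

-- contains of B's final covered set agrees with pvCov on tokens of expected
theorem pvContainsB (expected hits : List String) (t : String) (ht : t ∈ expected) :
    PySem.Set.contains
      ((pvLoopB hits
          (PySem.Set.inter (PySem.Set.ofList expected) (PySem.Set.ofList hits))
          (expected.filter (fun t => !(PySem.Set.contains
            (PySem.Set.inter (PySem.Set.ofList expected) (PySem.Set.ofList hits)) t)))).1) t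
    = pvCov hits t := by
  have hcov0 : ∀ y : String,
      y ∈ PySem.Set.inter (PySem.Set.ofList expected) (PySem.Set.ofList hits)
        ↔ y ∈ expected ∧ y ∈ hits := by
    intro y
    rw [PySem.Set.mem_inter, PySem.Set.mem_ofList, PySem.Set.mem_ofList]
  by_cases hc : pvCov hits t = true
  · rw [hc, PySem.Set.contains_iff, pvLoopB_fst_mem]
    by_cases h0 : PySem.Set.contains
        (PySem.Set.inter (PySem.Set.ofList expected) (PySem.Set.ofList hits)) t = true
    · exact Or.inl ((PySem.Set.contains_iff _ _).1 h0)
    · refine Or.inr ⟨List.mem_filter.2 ⟨ht, ?_⟩, hc⟩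
      rw [Bool.eq_false_iff.2 h0]
      simp
  · rw [Bool.eq_false_iff.2 hc, Bool.eq_false_iff]
    intro hcc
    rcases (pvLoopB_fst_mem _ _ _ _).1 ((PySem.Set.contains_iff _ _).1 hcc) with hx | ⟨_, hc'⟩
    · have := ((hcov0 t).1 hx).2
      apply hc
      refine List.any_eq_true.2 ⟨t, this, ?_⟩
      exact (PySem.Str.isIn_iff_infix _ _).2 (List.infix_refl _)
    · exact hc hc'

-- A's per-token condition equals pvCov: equality with a hit implies substring of that hit
theorem pvCondA (hits : List String) (t : String) :
    (PySem.Set.contains (PySem.Set.ofList hits) t || hits.any (fun h => PySem.Str.isIn t h))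
      = pvCov hits t := by
  unfold pvCov
  by_cases hm : t ∈ hits
  · have h1 : PySem.Set.contains (PySem.Set.ofList hits) t = true :=
      (PySem.Set.contains_iff _ _).2 ((PySem.Set.mem_ofList _ _).2 hm)
    have h2 : hits.any (fun h => PySem.Str.isIn t h) = true := by
      refine List.any_eq_true.2 ⟨t, hm, ?_⟩
      exact (PySem.Str.isIn_iff_infix _ _).2 (List.infix_refl _)
    rw [h1, h2]
    rfl
  · have h1 : PySem.Set.contains (PySem.Set.ofList hits) t = false := by
      rw [Bool.eq_false_iff]
      intro hc
      exact hm ((PySem.Set.mem_ofList _ _).1 ((PySem.Set.contains_iff _ _).1 hc))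
    rw [h1]
    exact Bool.false_or _

-- a fold appending to one of two accumulators by a condition is the partition by that condition
theorem pvFoldPartition (c : String → Bool) (l m s : List String) :
    l.foldl
      (fun (acc : List String × List String) token =>
        if c token then (acc.1 ++ [token], acc.2) else (acc.1, acc.2 ++ [token]))
      (m, s)
    = (m ++ l.filter c, s ++ l.filter (fun t => !(c t))) := by
  induction l generalizing m s with
  | nil => simp
  | cons a tl ih =>
      simp only [List.foldl_cons, List.filter_cons]
      by_cases hc : c a = true
      · simp [hc, ih]
      · simp [Bool.eq_false_iff.2 hc, ih]

-- ===== VERDICT (by name: the statement is the Claim_ definition above) =====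
theorem hits_cover_expected_py_spec : Claim_equal_hits_cover_expected_py := by
  intro expected hits _
  unfold Spec_hits_cover_expected_py hits_cover_expected_py hits_cover_expected_py_alt
  simp only [pvCondA]
  rw [pvFoldPartition]
  simp only [List.nil_append, Prod.mk.injEq]
  constructor
  · exact List.filter_congr (fun t ht => (pvContainsB expected hits t ht).symm)
  · refine List.filter_congr (fun t ht => ?_)
    rw [pvContainsB expected hits t ht]
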